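-- pv_equiv track=rewrite | github.com/papichoolo/Leetcode_Pain | TCS_CODEVITA/Q3.py | max_time_to_escape
-- ===== SOURCE A (Python) =====
-- import heapq
--
-- def max_time_to_escape(fortress):
--     def dijkstra():
--         heap = [(0, 0, 0)]  # (distance, row, col)
--         distances = {(0, 0): 0}
--
--         while heap:
--             dist, row, col = heapq.heappop(heap)
--
--             if row == m - 1 and col == n - 1:
--                 return dist
--
--             for dr, dc in [(1, 0), (-1, 0), (0, 1), (0, -1)]:
--                 new_row, new_col = row + dr, col + dc
--
--                 if 0 <= new_row < m and 0 <= new_col < n and (new_row, new_col) not in distances and fortress[new_row][new_col] == 0: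
--                     distances[(new_row, new_col)] = dist + 1
--                     heapq.heappush(heap, (dist + 1, new_row, new_col))
--
--         return float('inf')
--
--     m, n = len(fortress), len(fortress[0])
--     initial_time = dijkstra()  # Find the initial shortest path without blocking any room
--
--     max_time = 0
--
--     for i in range(m):
--         for j in range(n):
--             if fortress[i][j] == 0:
--                 fortress[i][j] = 1  # Block the room temporarily
--                 max_time = max(max_time, dijkstra())  # Recalculate the path with the blocked room
--                 fortress[i][j] = 0  # Unblock the room for the next iteration
--
--     return max_time if max_time < float('inf') else -1
-- ===== SOURCE B (Python) =====
-- def max_time_to_escape(fortress):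
--     m, n = len(fortress), len(fortress[0])
--
--     def shortest():
--         # Layered BFS over set frontiers; (0, 0) is seeded unconditionally.
--         target = (m - 1, n - 1)
--         visited = {(0, 0)}
--         frontier = {(0, 0)}
--         dist = 0
--         while frontier:
--             if target in frontier:
--                 return dist
--             nxt = set()
--             for r, c in frontier:
--                 for nr, nc in ((r + 1, c), (r - 1, c), (r, c + 1), (r, c - 1)):
--                     if 0 <= nr < m and 0 <= nc < n and (nr, nc) not in visited and fortress[nr][nc] == 0:
--                         visited.add((nr, nc))
--                         nxt.add((nr, nc))
--             frontier = nxt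
--             dist += 1
--         return None
--
--     unreachable = False
--     best = 0
--     for i in range(m):
--         for j in range(n):
--             if fortress[i][j] == 0:
--                 fortress[i][j] = 1
--                 d = shortest()
--                 fortress[i][j] = 0
--                 if d is None:
--                     unreachable = True
--                 else:
--                     best = max(best, d)
--     return -1 if unreachable else best
-- ===== Notes on version B (the rewrite author's own statement) =====
-- stated objective: alternative
-- what changed: The inner heap+dict Dijkstra is replaced by a layered breadth-first search over set frontiers (visited set plus whole-layer expansion, no priority queue, no distance dictionary, no per-node pops), while the outer block-each-free-cell loop and the unreachable->-1 remap are kept.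
import Mathlib
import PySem

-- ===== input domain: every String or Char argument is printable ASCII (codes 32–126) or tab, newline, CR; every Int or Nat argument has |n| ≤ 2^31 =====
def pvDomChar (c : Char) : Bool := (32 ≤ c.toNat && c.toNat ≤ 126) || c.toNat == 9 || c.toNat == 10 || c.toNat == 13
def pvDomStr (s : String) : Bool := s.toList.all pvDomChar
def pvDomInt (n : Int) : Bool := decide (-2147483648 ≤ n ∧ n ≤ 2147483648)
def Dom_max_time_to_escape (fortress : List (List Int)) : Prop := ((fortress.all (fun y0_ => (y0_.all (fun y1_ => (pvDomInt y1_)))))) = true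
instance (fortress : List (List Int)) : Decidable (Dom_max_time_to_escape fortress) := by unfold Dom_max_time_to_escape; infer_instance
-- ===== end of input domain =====

-- B replaces A's per-blocking heap+dict Dijkstra by a layered breadth-first search over set
-- frontiers (alternative algorithm, same results; A mutates and restores its argument in place,
-- so the net side effect of both programs is none and the equivalence is about the return value).


-- ===== PORT A =====

/-- `fortress[r][c]` as a total read; every use is guarded by `0 ≤ r < len(fortress)` and
    `0 ≤ c < len(fortress[0])`, where it is exact under `Pre_` (all rows at least that long). -/
def pvCell (g : List (List Int)) (r c : Int) : Int :=
  PySem.List.pyGetD (PySem.List.pyGetD g r []) c 1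

/-- `fortress[i][j] = v`. Python blocks the cell in place and restores the very same cell
    afterwards, so a functional update on a copy is exact for the returned value. -/
def pvSetCell (g : List (List Int)) (i j v : Int) : List (List Int) :=
  PySem.List.pySetD g i (PySem.List.pySetD (PySem.List.pyGetD g i []) j v)

/-- Python's `<` on the `(distance, row, col)` tuples. -/
def pvEntLt (a b : Int × Int × Int) : Bool :=
  decide (a.1 < b.1 ∨ (a.1 = b.1 ∧ (a.2.1 < b.2.1 ∨ (a.2.1 = b.2.1 ∧ a.2.2 < b.2.2))))

/-- `heapq.heappop`: the heap's entries are pairwise distinct (at most one entry per cell, by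
    the `distances` check), so popping the least entry w.r.t. tuple order is exact. -/
def pvPopMin (h : List (Int × Int × Int)) :
    Option ((Int × Int × Int) × List (Int × Int × Int)) :=
  match h with
  | [] => none
  | x :: xs =>
      let e := xs.foldl (fun acc y => if pvEntLt y acc then y else acc) x
      some (e, (x :: xs).erase e)

def pvOffsets : List (Int × Int) := [(1, 0), (-1, 0), (0, 1), (0, -1)]

/-- one pass of the `for dr, dc in […]` body of A's dijkstra. -/
def pvPush (g : List (List Int)) (m n d r c : Int)
    (st : List (Int × Int × Int) × PySem.Dict (Int × Int) Int) (off : Int × Int) :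
    List (Int × Int × Int) × PySem.Dict (Int × Int) Int :=
  let nr := r + off.1
  let nc := c + off.2
  if 0 ≤ nr ∧ nr < m ∧ 0 ≤ nc ∧ nc < n ∧ st.2.contains (nr, nc) = false ∧ pvCell g nr nc = 0 then
    (st.1 ++ [(d + 1, nr, nc)], st.2.insert (nr, nc) (d + 1))
  else st

/-- the `while heap:` loop; the fuel only bounds the number of iterations (each iteration pops
    one entry and every pushed entry records a fresh key, so `m*n + 2` is proved sufficient). -/
def pvDijkLoop (g : List (List Int)) (m n : Int) :
    Nat → List (Int × Int × Int) → PySem.Dict (Int × Int) Int → Option (Option Int)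
  | 0, _, _ => none
  | fuel + 1, heap, dists =>
    match pvPopMin heap with
    | none => some none                                   -- return float('inf')
    | some (e, rest) =>
      if e.2.1 = m - 1 ∧ e.2.2 = n - 1 then some (some e.1)
      else
        pvDijkLoop g m n fuel
          (pvOffsets.foldl (pvPush g m n e.1 e.2.1 e.2.2) (rest, dists)).1
          (pvOffsets.foldl (pvPush g m n e.1 e.2.1 e.2.2) (rest, dists)).2

/-- A's `dijkstra()`; `none` stands for `float('inf')`. -/
def pvDijkstra (g : List (List Int)) (m n : Int) : Option Int :=
  (pvDijkLoop g m n ((m * n).toNat + 2) [(0, 0, 0)]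
    (PySem.Dict.empty.insert (0, 0) 0)).getD none

/-- `max(max_time, dijkstra())` with `none = float('inf')`. -/
def pvMaxO : Option Int → Option Int → Option Int
  | some a, some b => some (max a b)
  | _, _ => none

def max_time_to_escape (fortress : List (List Int)) : Int :=
  let m := PySem.List.len fortress
  let n := PySem.List.len (PySem.List.pyGetD fortress 0 [])
  let _initial_time := pvDijkstra fortress m n
  let mt :=
    (PySem.List.pyRange 0 m 1).foldl (fun acc i =>
      (PySem.List.pyRange 0 n 1).foldl (fun acc j =>
        if pvCell fortress i j = 0 then
          pvMaxO acc (pvDijkstra (pvSetCell fortress i j 1) m n)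
        else acc) acc) (some 0)
  match mt with
  | some v => v
  | none => -1

-- ===== PORT B =====

def pvNbrs (p : Int × Int) : List (Int × Int) :=
  [(p.1 + 1, p.2), (p.1 - 1, p.2), (p.1, p.2 + 1), (p.1, p.2 - 1)]

/-- body of B's `for r, c in frontier: for nr, nc in …`. The frontier set is consumed only to
    build two further sets that are later read by membership/emptiness alone, so folding the
    Set's list is exact (the result cannot depend on Python's set iteration order). -/
def pvScan (g : List (List Int)) (m n : Int)
    (st : PySem.Set (Int × Int) × PySem.Set (Int × Int)) (p : Int × Int) :
    PySem.Set (Int × Int) × PySem.Set (Int × Int) :=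
  (pvNbrs p).foldl (fun st q =>
    if 0 ≤ q.1 ∧ q.1 < m ∧ 0 ≤ q.2 ∧ q.2 < n ∧ q ∉ st.1 ∧ pvCell g q.1 q.2 = 0 then
      (PySem.Set.add st.1 q, PySem.Set.add st.2 q)
    else st) st

/-- B's `while frontier:` loop; the fuel only bounds the number of layers (the visited set grows
    every continued iteration, so `m*n + 2` is proved sufficient). -/
def pvBfsLoop (g : List (List Int)) (m n : Int) :
    Nat → PySem.Set (Int × Int) → PySem.Set (Int × Int) → Int → Option (Option Int)
  | 0, _, _, _ => none
  | fuel + 1, visited, frontier, dist =>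
    if frontier = [] then some none                       -- while exits: return None
    else if (m - 1, n - 1) ∈ frontier then some (some dist)
    else
      pvBfsLoop g m n fuel
        (frontier.foldl (pvScan g m n) (visited, PySem.Set.empty)).1
        (frontier.foldl (pvScan g m n) (visited, PySem.Set.empty)).2 (dist + 1)

/-- B's `shortest()`; `none` stands for `None`. -/
def pvShortest (g : List (List Int)) (m n : Int) : Option Int :=
  (pvBfsLoop g m n ((m * n).toNat + 2) [(0, 0)] [(0, 0)] 0).getD none

def max_time_to_escape_alt (fortress : List (List Int)) : Int :=
  let m := PySem.List.len fortress
  let n := PySem.List.len (PySem.List.pyGetD fortress 0 [])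
  let st :=
    (PySem.List.pyRange 0 m 1).foldl (fun acc i =>
      (PySem.List.pyRange 0 n 1).foldl (fun acc j =>
        if pvCell fortress i j = 0 then
          match pvShortest (pvSetCell fortress i j 1) m n with
          | none => (true, acc.2)
          | some d => (acc.1, max acc.2 d)
        else acc) acc) (false, (0 : Int))
  if st.1 then -1 else st.2

-- ===== PRECONDITION & SPEC =====

-- Pre_ excludes exactly the inputs on which the Python raises IndexError: the empty grid
-- (`fortress[0]`), and grids with a row shorter than the first row (the i/j loop reads
-- `fortress[i][j]` for every j < len(fortress[0])).
def Pre_max_time_to_escape (fortress : List (List Int)) : Prop :=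
  fortress ≠ [] ∧ ∀ row ∈ fortress, (fortress.head?.getD []).length ≤ row.length
instance (fortress : List (List Int)) : Decidable (Pre_max_time_to_escape fortress) := by
  unfold Pre_max_time_to_escape; infer_instance

def pvWitness_max_time_to_escape : List (List Int) := [[0, 0], [1, 0]]

def Spec_max_time_to_escape (fortress : List (List Int)) (out : Int) : Prop :=
  out = max_time_to_escape_alt fortress
instance (fortress : List (List Int)) (out : Int) :
    Decidable (Spec_max_time_to_escape fortress out) := by
  unfold Spec_max_time_to_escape; infer_instance

-- ===== CLAIM (what is proved, stated in full; the proofs are below) =====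
def Claim_equal_max_time_to_escape : Prop :=
  ∀ (fortress : List (List Int)), Dom_max_time_to_escape fortress →
    Pre_max_time_to_escape fortress →
    Spec_max_time_to_escape fortress (max_time_to_escape fortress)

-- ===== LEMMAS AND PROOFS =====

-- ---- proof-only abbreviations ----

/-- in-bounds and free (an abbreviation so decidability is inferred). -/
abbrev pvOk (g : List (List Int)) (m n : Int) (p : Int × Int) : Prop :=
  0 ≤ p.1 ∧ p.1 < m ∧ 0 ≤ p.2 ∧ p.2 < n ∧ pvCell g p.1 p.2 = 0

/-- the cells discovered so far in the current layer: free, unvisited, adjacent to an already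
    processed member of the frontier `F` (processed = no longer pending in `P`). -/
def pvN (g : List (List Int)) (m n : Int) (F P V : List (Int × Int)) (w : Int × Int) : Prop :=
  pvOk g m n w ∧ w ∉ V ∧ ∃ v ∈ F, v ∉ P ∧ w ∈ pvNbrs v

/-- invariant tying A's heap/dict state mid-layer to ghost data: current layer `F`, pending
    part `P` of it, visited set `V` (including `F`), current distance `d`. -/
def pvInv (g : List (List Int)) (m n d : Int) (heap : List (Int × Int × Int))
    (D : PySem.Dict (Int × Int) Int) (F P V : List (Int × Int)) : Prop :=
  heap.Nodup ∧
  (∀ e, e ∈ heap ↔ (e.1 = d ∧ e.2 ∈ P) ∨ (e.1 = d + 1 ∧ pvN g m n F P V e.2)) ∧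
  (∀ w, D.contains w = true ↔ w ∈ V ∨ pvN g m n F P V w) ∧
  D.keys.Nodup ∧
  P ⊆ F ∧ F ⊆ V ∧ P.Nodup ∧ V.Nodup ∧ F ≠ [] ∧
  ((m - 1, n - 1) ∈ F → (m - 1, n - 1) ∈ P) ∧
  (∀ x ∈ V, x = (0, 0) ∨ (0 ≤ x.1 ∧ x.1 < m ∧ 0 ≤ x.2 ∧ x.2 < n))

-- ---- order facts about pvEntLt ----

lemma pvEntLt_first (a b : Int × Int × Int) (h : a.1 < b.1) : pvEntLt a b = true := by
  simp only [pvEntLt, decide_eq_true_eq]; omega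

lemma pvEntLt_trans (a b c : Int × Int × Int) (h1 : pvEntLt a b = true)
    (h2 : pvEntLt b c = true) : pvEntLt a c = true := by
  simp only [pvEntLt, decide_eq_true_eq] at *; omega

lemma pvEntLt_conn (a b : Int × Int × Int) (h1 : pvEntLt a b = false)
    (h2 : pvEntLt b a = false) : a = b := by
  simp only [pvEntLt, decide_eq_false_iff_not, not_or, not_and, not_lt] at *
  obtain ⟨a1, a2, a3⟩ := a; obtain ⟨b1, b2, b3⟩ := b
  simp_all; omega

-- ---- popMin spec ----

lemma pvEntLt_irrefl (a : Int × Int × Int) : pvEntLt a a = false := by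
  simp [pvEntLt]

lemma pvEntLt_total (a b : Int × Int × Int) (h : pvEntLt a b = false) :
    pvEntLt b a = true ∨ a = b := by
  by_cases hba : pvEntLt b a = true
  · exact Or.inl hba
  · exact Or.inr (pvEntLt_conn a b h (by simpa using hba))

lemma pvFoldMin_spec (x : Int × Int × Int) (xs : List (Int × Int × Int)) :
    (xs.foldl (fun acc y => if pvEntLt y acc then y else acc) x) ∈ x :: xs ∧
    ∀ y ∈ x :: xs, pvEntLt y (xs.foldl (fun acc y => if pvEntLt y acc then y else acc) x) = false := by
  induction xs generalizing x with
  | nil =>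
    refine ⟨List.mem_cons_self, ?_⟩
    intro y hy
    rw [List.mem_singleton.1 hy]
    exact pvEntLt_irrefl _
  | cons z zs ih =>
    simp only [List.foldl_cons]
    by_cases hzx : pvEntLt z x = true
    · rw [if_pos hzx]
      obtain ⟨hmem, hmin⟩ := ih z
      refine ⟨?_, ?_⟩
      · rcases List.mem_cons.1 hmem with h | h
        · rw [h]; exact List.mem_cons_of_mem _ List.mem_cons_self
        · exact List.mem_cons_of_mem _ (List.mem_cons_of_mem _ h)
      · intro y hy
        rcases List.mem_cons.1 hy with hyx | hy'
        · subst hyx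
          by_contra hxe
          have hxe' := Bool.ne_false_iff.1 hxe
          have h2 := pvEntLt_trans z y _ hzx hxe'
          rw [hmin z List.mem_cons_self] at h2
          exact Bool.false_ne_true h2
        · exact hmin y hy'
    · rw [if_neg hzx]
      have hzx' : pvEntLt z x = false := by
        cases h : pvEntLt z x
        · rfl
        · exact absurd h hzx
      obtain ⟨hmem, hmin⟩ := ih x
      refine ⟨?_, ?_⟩
      · rcases List.mem_cons.1 hmem with h | h
        · rw [h]; exact List.mem_cons_self
        · exact List.mem_cons_of_mem _ (List.mem_cons_of_mem _ h)
      · intro y hy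
        rcases List.mem_cons.1 hy with hyx | hy'
        · subst hyx; exact hmin y List.mem_cons_self
        rcases List.mem_cons.1 hy' with hyz | hy''
        · subst hyz
          by_contra hze
          have hze' := Bool.ne_false_iff.1 hze
          rcases pvEntLt_total y x hzx' with hxy | hxy
          · have h2 := pvEntLt_trans x y _ hxy hze'
            rw [hmin x List.mem_cons_self] at h2
            exact Bool.false_ne_true h2
          · rw [hxy] at hze'
            rw [hmin x List.mem_cons_self] at hze'
            exact Bool.false_ne_true hze'
        · exact hmin y (List.mem_cons_of_mem _ hy'')

lemma pvPopMin_spec (heap : List (Int × Int × Int)) (hne : heap ≠ []) :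
    ∃ e, pvPopMin heap = some (e, heap.erase e) ∧ e ∈ heap ∧
      ∀ y ∈ heap, pvEntLt y e = false := by
  cases heap with
  | nil => exact absurd rfl hne
  | cons x xs =>
    obtain ⟨hmem, hmin⟩ := pvFoldMin_spec x xs
    exact ⟨_, rfl, hmem, hmin⟩

-- ---- push-fold characterization (A's inner for-loop) ----

def pvTgt (r c : Int) (off : Int × Int) : Int × Int := (r + off.1, c + off.2)

abbrev pvCond (g : List (List Int)) (m n : Int) (D : PySem.Dict (Int × Int) Int)
    (r c : Int) (off : Int × Int) : Prop :=
  pvOk g m n (pvTgt r c off) ∧ D.contains (pvTgt r c off) = false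

lemma pvTgt_inj (r c : Int) (o o' : Int × Int) (h : pvTgt r c o = pvTgt r c o') : o = o' := by
  obtain ⟨a, b⟩ := o; obtain ⟨a', b'⟩ := o'
  simp only [pvTgt, Prod.mk.injEq] at h ⊢; omega

lemma pvNbrs_iff (p w : Int × Int) : w ∈ pvNbrs p ↔ ∃ o ∈ pvOffsets, w = pvTgt p.1 p.2 o := by
  obtain ⟨a, b⟩ := p; obtain ⟨u, v⟩ := w
  simp only [pvNbrs, pvOffsets, pvTgt, List.mem_cons, List.not_mem_nil, or_false,
    Prod.mk.injEq]
  constructor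
  · rintro (⟨h1, h2⟩ | ⟨h1, h2⟩ | ⟨h1, h2⟩ | ⟨h1, h2⟩)
    · exact ⟨(1, 0), Or.inl rfl, by omega, by omega⟩
    · exact ⟨(-1, 0), Or.inr (Or.inl rfl), by omega, by omega⟩
    · exact ⟨(0, 1), Or.inr (Or.inr (Or.inl rfl)), by omega, by omega⟩
    · exact ⟨(0, -1), Or.inr (Or.inr (Or.inr rfl)), by omega, by omega⟩
  · rintro ⟨o, (rfl | rfl | rfl | rfl), h1, h2⟩ <;> simp_all <;> omega

lemma pvPush_eq (g : List (List Int)) (m n d r c : Int)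
    (st : List (Int × Int × Int) × PySem.Dict (Int × Int) Int) (off : Int × Int) :
    pvPush g m n d r c st off =
      if pvCond g m n st.2 r c off then
        (st.1 ++ [(d + 1, pvTgt r c off)], st.2.insert (pvTgt r c off) (d + 1))
      else st := by
  unfold pvPush pvCond pvOk pvTgt
  dsimp only
  split_ifs with h1 h2 <;> first | rfl | (exfalso; tauto)

lemma pvPushFold_eq (g : List (List Int)) (m n d r c : Int) :
    ∀ (offs : List (Int × Int)) (h0 : List (Int × Int × Int))
      (D0 : PySem.Dict (Int × Int) Int), offs.Nodup →
    offs.foldl (pvPush g m n d r c) (h0, D0) =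
      (h0 ++ (offs.filter (fun o => decide (pvCond g m n D0 r c o))).map
          (fun o => (d + 1, pvTgt r c o)),
       (offs.filter (fun o => decide (pvCond g m n D0 r c o))).foldl
          (fun D o => D.insert (pvTgt r c o) (d + 1)) D0) := by
  intro offs
  induction offs with
  | nil => intro h0 D0 _; simp
  | cons o offs ih =>
    intro h0 D0 hnd
    have hnd' := (List.nodup_cons.1 hnd).2
    have hno : o ∉ offs := (List.nodup_cons.1 hnd).1
    have hfc : ∀ (D0' : PySem.Dict (Int × Int) Int),
        (∀ o' ∈ offs, (D0'.contains (pvTgt r c o') = D0.contains (pvTgt r c o'))) →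
        offs.filter (fun o' => decide (pvCond g m n D0' r c o')) =
          offs.filter (fun o' => decide (pvCond g m n D0 r c o')) := by
      intro D0' hsame
      apply List.filter_congr
      intro x hx
      simp only [decide_eq_decide, pvCond]
      rw [hsame x hx]
    simp only [List.foldl_cons]
    rw [pvPush_eq]
    by_cases hc : pvCond g m n D0 r c o
    · rw [if_pos hc]
      rw [ih _ _ hnd']
      have hcont : ∀ o' ∈ offs,
          ((D0.insert (pvTgt r c o) (d + 1)).contains (pvTgt r c o') =
            D0.contains (pvTgt r c o')) := by
        intro o' ho'
        rw [PySem.Dict.contains_insert]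
        have hne : pvTgt r c o' ≠ pvTgt r c o := by
          intro h; exact hno (pvTgt_inj r c o' o h ▸ ho')
        simp [hne]
      rw [hfc _ hcont]
      simp [hc]
    · rw [if_neg hc]
      rw [ih _ _ hnd']
      simp [hc]

-- ---- scan-fold characterization (B's layer expansion) ----

lemma pvScanStep_eq (g : List (List Int)) (m n : Int)
    (vis nxt : PySem.Set (Int × Int)) (q : Int × Int) :
    (if 0 ≤ q.1 ∧ q.1 < m ∧ 0 ≤ q.2 ∧ q.2 < n ∧ q ∉ vis ∧ pvCell g q.1 q.2 = 0 then
        (PySem.Set.add vis q, PySem.Set.add nxt q)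
      else (vis, nxt)) =
      if pvOk g m n q ∧ q ∉ vis then (PySem.Set.add vis q, PySem.Set.add nxt q)
      else (vis, nxt) := by
  unfold pvOk
  split_ifs with h1 h2 <;> first | rfl | (exfalso; tauto)

lemma pvScanFoldAux (g : List (List Int)) (m n : Int) (V0 : List (Int × Int)) :
    ∀ (qs : List (Int × Int)) (vis nxt : List (Int × Int)),
      (∀ x, x ∈ vis ↔ x ∈ V0 ∨ x ∈ nxt) → vis.Nodup → nxt.Nodup →
      (∀ x, x ∈ (qs.foldl (fun st q =>
          if 0 ≤ q.1 ∧ q.1 < m ∧ 0 ≤ q.2 ∧ q.2 < n ∧ q ∉ st.1 ∧ pvCell g q.1 q.2 = 0 then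
            (PySem.Set.add st.1 q, PySem.Set.add st.2 q)
          else st) (vis, nxt)).2 ↔ x ∈ nxt ∨ (pvOk g m n x ∧ x ∉ V0 ∧ x ∈ qs)) ∧
      (∀ x, x ∈ (qs.foldl (fun st q =>
          if 0 ≤ q.1 ∧ q.1 < m ∧ 0 ≤ q.2 ∧ q.2 < n ∧ q ∉ st.1 ∧ pvCell g q.1 q.2 = 0 then
            (PySem.Set.add st.1 q, PySem.Set.add st.2 q)
          else st) (vis, nxt)).1 ↔ x ∈ V0 ∨ x ∈ (qs.foldl (fun st q =>
          if 0 ≤ q.1 ∧ q.1 < m ∧ 0 ≤ q.2 ∧ q.2 < n ∧ q ∉ st.1 ∧ pvCell g q.1 q.2 = 0 then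
            (PySem.Set.add st.1 q, PySem.Set.add st.2 q)
          else st) (vis, nxt)).2) ∧
      (qs.foldl (fun st q =>
          if 0 ≤ q.1 ∧ q.1 < m ∧ 0 ≤ q.2 ∧ q.2 < n ∧ q ∉ st.1 ∧ pvCell g q.1 q.2 = 0 then
            (PySem.Set.add st.1 q, PySem.Set.add st.2 q)
          else st) (vis, nxt)).1.Nodup ∧
      (qs.foldl (fun st q =>
          if 0 ≤ q.1 ∧ q.1 < m ∧ 0 ≤ q.2 ∧ q.2 < n ∧ q ∉ st.1 ∧ pvCell g q.1 q.2 = 0 then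
            (PySem.Set.add st.1 q, PySem.Set.add st.2 q)
          else st) (vis, nxt)).2.Nodup ∧
      (qs.foldl (fun st q =>
          if 0 ≤ q.1 ∧ q.1 < m ∧ 0 ≤ q.2 ∧ q.2 < n ∧ q ∉ st.1 ∧ pvCell g q.1 q.2 = 0 then
            (PySem.Set.add st.1 q, PySem.Set.add st.2 q)
          else st) (vis, nxt)).1.length + nxt.length =
        vis.length + (qs.foldl (fun st q =>
          if 0 ≤ q.1 ∧ q.1 < m ∧ 0 ≤ q.2 ∧ q.2 < n ∧ q ∉ st.1 ∧ pvCell g q.1 q.2 = 0 then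
            (PySem.Set.add st.1 q, PySem.Set.add st.2 q)
          else st) (vis, nxt)).2.length := by
  intro qs
  induction qs with
  | nil =>
    intro vis nxt hrel hvn hnn
    simp only [List.foldl_nil]
    exact ⟨by simp, hrel, hvn, hnn, by simp⟩
  | cons q qs ih =>
    intro vis nxt hrel hvn hnn
    simp only [List.foldl_cons]
    rw [pvScanStep_eq g m n vis nxt q]
    by_cases hq : pvOk g m n q ∧ q ∉ vis
    · rw [if_pos hq]
      have hqn : q ∉ nxt := fun h => hq.2 ((hrel q).2 (Or.inr h))
      have hqV0 : q ∉ V0 := fun h => hq.2 ((hrel q).2 (Or.inl h))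
      have hva : PySem.Set.add vis q = vis ++ [q] := PySem.Set.add_of_not_mem hq.2
      have hna : PySem.Set.add nxt q = nxt ++ [q] := PySem.Set.add_of_not_mem hqn
      have hrel' : ∀ x, x ∈ PySem.Set.add vis q ↔ x ∈ V0 ∨ x ∈ PySem.Set.add nxt q := by
        intro x
        rw [hva, hna]
        simp only [List.mem_append, List.mem_singleton]
        rw [hrel x]; tauto
      obtain ⟨h2, h1, hn1, hn2, hlen⟩ :=
        ih (PySem.Set.add vis q) (PySem.Set.add nxt q) hrel'
          (PySem.Set.nodup_add vis q hvn) (PySem.Set.nodup_add nxt q hnn)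
      refine ⟨?_, h1, hn1, hn2, ?_⟩
      · intro x
        rw [h2 x, hna]
        simp only [List.mem_append, List.mem_cons,
          List.not_mem_nil, or_false]
        constructor
        · rintro ((hx | rfl) | ⟨hok, hv0, hqs⟩)
          · exact Or.inl hx
          · exact Or.inr ⟨hq.1, hqV0, Or.inl rfl⟩
          · exact Or.inr ⟨hok, hv0, Or.inr hqs⟩
        · rintro (hx | ⟨hok, hv0, rfl | hqs⟩)
          · exact Or.inl (Or.inl hx)
          · exact Or.inl (Or.inr rfl)
          · exact Or.inr ⟨hok, hv0, hqs⟩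
      · have l1 : (PySem.Set.add vis q).length = vis.length + 1 := by
          rw [hva]; simp
        have l2 : (PySem.Set.add nxt q).length = nxt.length + 1 := by
          rw [hna]; simp
        rw [l1, l2] at hlen
        omega
    · rw [if_neg hq]
      obtain ⟨h2, h1, hn1, hn2, hlen⟩ := ih vis nxt hrel hvn hnn
      refine ⟨?_, h1, hn1, hn2, hlen⟩
      intro x
      rw [h2 x]
      simp only [List.mem_cons]
      constructor
      · rintro (hx | ⟨hok, hv0, hqs⟩)
        · exact Or.inl hx
        · exact Or.inr ⟨hok, hv0, Or.inr hqs⟩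
      · rintro (hx | ⟨hok, hv0, rfl | hqs⟩)
        · exact Or.inl hx
        · rcases not_and_or.1 hq with hbad | hv
          · exact absurd hok hbad
          · rcases (hrel x).1 (not_not.1 hv) with h | h
            · exact absurd h hv0
            · exact Or.inl h
        · exact Or.inr ⟨hok, hv0, hqs⟩

lemma pvScanFold_spec (g : List (List Int)) (m n : Int) (V0 : List (Int × Int)) :
    ∀ (ps : List (Int × Int)) (vis nxt : List (Int × Int)),
      (∀ x, x ∈ vis ↔ x ∈ V0 ∨ x ∈ nxt) → vis.Nodup → nxt.Nodup →
      (∀ x, x ∈ (ps.foldl (pvScan g m n) (vis, nxt)).2 ↔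
          x ∈ nxt ∨ (pvOk g m n x ∧ x ∉ V0 ∧ ∃ p ∈ ps, x ∈ pvNbrs p)) ∧
      (∀ x, x ∈ (ps.foldl (pvScan g m n) (vis, nxt)).1 ↔
          x ∈ V0 ∨ x ∈ (ps.foldl (pvScan g m n) (vis, nxt)).2) ∧
      (ps.foldl (pvScan g m n) (vis, nxt)).1.Nodup ∧
      (ps.foldl (pvScan g m n) (vis, nxt)).2.Nodup ∧
      (ps.foldl (pvScan g m n) (vis, nxt)).1.length + nxt.length =
        vis.length + (ps.foldl (pvScan g m n) (vis, nxt)).2.length := by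
  intro ps vis nxt hrel hvn hnn
  have hfold : ps.foldl (pvScan g m n) (vis, nxt) =
      (ps.flatMap pvNbrs).foldl (fun st q =>
        if 0 ≤ q.1 ∧ q.1 < m ∧ 0 ≤ q.2 ∧ q.2 < n ∧ q ∉ st.1 ∧ pvCell g q.1 q.2 = 0 then
          (PySem.Set.add st.1 q, PySem.Set.add st.2 q)
        else st) (vis, nxt) := by
    rw [List.foldl_flatMap]; rfl
  obtain ⟨h2, h1, hn1, hn2, hlen⟩ :=
    pvScanFoldAux g m n V0 (ps.flatMap pvNbrs) vis nxt hrel hvn hnn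
  rw [hfold]
  refine ⟨?_, h1, hn1, hn2, hlen⟩
  intro x
  rw [h2 x]
  simp only [List.mem_flatMap]

-- ---- cardinality bound ----

lemma pvCard (m n : Int) (L : List (Int × Int)) (hnd : L.Nodup)
    (hmem : ∀ x ∈ L, x = (0, 0) ∨ (0 ≤ x.1 ∧ x.1 < m ∧ 0 ≤ x.2 ∧ x.2 < n)) :
    L.length ≤ (m * n).toNat + 1 := by
  classical
  have hsub : ∀ x ∈ L, x ∈ insert ((0 : Int), (0 : Int))
      (Finset.Ico (0 : Int) m ×ˢ Finset.Ico (0 : Int) n) := by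
    intro x hx
    rcases hmem x hx with rfl | h
    · exact Finset.mem_insert_self _ _
    · exact Finset.mem_insert_of_mem (by
        rw [Finset.mem_product, Finset.mem_Ico, Finset.mem_Ico]; exact ⟨⟨h.1, h.2.1⟩, ⟨h.2.2.1, h.2.2.2⟩⟩)
  have h1 : L.length = L.toFinset.card := (List.toFinset_card_of_nodup hnd).symm
  have h2 : L.toFinset ⊆ insert ((0 : Int), (0 : Int))
      (Finset.Ico (0 : Int) m ×ˢ Finset.Ico (0 : Int) n) := by
    intro x hx; exact hsub x (List.mem_toFinset.1 hx)
  have h3 := Finset.card_le_card h2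
  have h4 : (insert ((0 : Int), (0 : Int))
      (Finset.Ico (0 : Int) m ×ˢ Finset.Ico (0 : Int) n)).card ≤
      (Finset.Ico (0 : Int) m ×ˢ Finset.Ico (0 : Int) n).card + 1 := Finset.card_insert_le _ _
  have h5 : (Finset.Ico (0 : Int) m ×ˢ Finset.Ico (0 : Int) n).card = m.toNat * n.toNat := by
    rw [Finset.card_product, Int.card_Ico, Int.card_Ico]
    simp
  have h6 : m.toNat * n.toNat ≤ (m * n).toNat := by
    by_cases hm : m ≤ 0
    · simp [Int.toNat_of_nonpos hm]
    · by_cases hn : n ≤ 0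
      · simp [Int.toNat_of_nonpos hn]
      · have hm' : (0 : Int) ≤ m := by omega
        have hn' : (0 : Int) ≤ n := by omega
        have hc : ((m.toNat * n.toNat : Nat) : Int) = m * n := by
          push_cast [Int.toNat_of_nonneg hm', Int.toNat_of_nonneg hn']; ring
        omega
  omega

-- ---- the main simulation ----

lemma pvDictFacts (r c d : Int) (D : PySem.Dict (Int × Int) Int) (hKnd : D.keys.Nodup)
    (FF : List (Int × Int)) (hFFf : ∀ o ∈ FF, D.contains (pvTgt r c o) = false)
    (hFFnd : FF.Nodup) :
    (∀ x, ((FF.foldl (fun Dd o => Dd.insert (pvTgt r c o) (d + 1)) D).contains x = true) ↔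
        (D.contains x = true ∨ ∃ o ∈ FF, x = pvTgt r c o)) ∧
    (FF.foldl (fun Dd o => Dd.insert (pvTgt r c o) (d + 1)) D).keys.Nodup ∧
    (FF.foldl (fun Dd o => Dd.insert (pvTgt r c o) (d + 1)) D).keys.length =
      D.keys.length + FF.length := by
  have hmapnd : (FF.map (fun o => pvTgt r c o)).Nodup :=
    hFFnd.map_on (fun o ho o' ho' h => pvTgt_inj r c o o' h)
  have hkeys := PySem.Dict.keys_foldl_insert_key FF (fun o => pvTgt r c o)
    (fun _ _ => d + 1) D
  have hitems := PySem.Dict.items_foldl_insert_fresh FF (fun o => pvTgt r c o)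
    (fun _ => d + 1) D hFFf hmapnd
  refine ⟨?_, ?_, ?_⟩
  · intro x
    rw [PySem.Dict.contains_iff_mem_keys, PySem.Dict.contains_iff_mem_keys, hkeys,
      PySem.Set.mem_update]
    simp only [List.mem_map]
    constructor
    · rintro (h | ⟨o, ho, rfl⟩)
      · exact Or.inl h
      · exact Or.inr ⟨o, ho, rfl⟩
    · rintro (h | ⟨o, ho, rfl⟩)
      · exact Or.inl h
      · exact Or.inr ⟨o, ho, rfl⟩
  · exact PySem.Dict.nodup_keys_foldl_insert_key FF (fun o => pvTgt r c o)
      (fun _ _ => d + 1) D hKnd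
  · simp only [PySem.Dict.keys] at *
    rw [hitems]
    simp

lemma pvMain (g : List (List Int)) (m n : Int) :
    ∀ (fuelA : Nat) (heap : List (Int × Int × Int)) (D : PySem.Dict (Int × Int) Int)
      (fuelB : Nat) (F P V : List (Int × Int)) (d : Int),
      pvInv g m n d heap D F P V →
      heap.length + (((m * n).toNat + 1) - D.keys.length) < fuelA →
      (((m * n).toNat + 1) - V.length) + 2 ≤ fuelB →
      pvDijkLoop g m n fuelA heap D = pvBfsLoop g m n fuelB V F d := by
  intro fuelA
  induction fuelA with
  | zero => intro heap D fuelB F P V d _ hHa _; omega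
  | succ fa ih =>
    intro heap D fuelB F P V d hInv hHa hHb
    obtain ⟨hNd, hHeap, hD, hKnd, hPF, hFV, hPnd, hVnd, hFne, hTgtF, hVin⟩ := hInv
    obtain ⟨fb, rfl⟩ : ∃ fb, fuelB = fb + 1 := ⟨fuelB - 1, by omega⟩
    have hDf : ∀ w, (D.contains w = false) ↔ ¬(w ∈ V ∨ pvN g m n F P V w) := by
      intro w
      rw [← hD w]
      cases h : D.contains w <;> simp
    by_cases hHe : heap = []
    · -- A's heap is exhausted: both sides return "infinity"
      subst hHe
      have hP : P = [] := by
        rcases hP : P with _ | ⟨p, P'⟩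
        · rfl
        · have := (hHeap (d, p)).2 (Or.inl ⟨rfl, by rw [hP]; exact List.mem_cons_self⟩)
          simp at this
      have hN0 : ∀ w, ¬ pvN g m n F P V w := by
        intro w hw
        have := (hHeap (d + 1, w)).2 (Or.inr ⟨rfl, hw⟩)
        simp at this
      have hA : pvDijkLoop g m n (fa + 1) [] D = some none := by
        simp [pvDijkLoop, pvPopMin]
      rw [hA]
      rw [pvBfsLoop]
      rw [if_neg hFne]
      rw [if_neg (show ¬ (m - 1, n - 1) ∈ F from fun h => by
        have := hTgtF h; rw [hP] at this; simp at this)]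
      obtain ⟨hm2, hm1, _, _, _⟩ :=
        pvScanFold_spec g m n V F V PySem.Set.empty (by intro x; simp [PySem.Set.empty])
          hVnd (by simp [PySem.Set.empty])
      have hS2 : (F.foldl (pvScan g m n) (V, PySem.Set.empty)).2 = [] := by
        rw [List.eq_nil_iff_forall_not_mem]
        intro x hx
        rcases (hm2 x).1 hx with hx0 | ⟨hok, hnv, p, hp, hadj⟩
        · simp [PySem.Set.empty] at hx0
        · exact hN0 x ⟨hok, hnv, p, hp, by rw [hP]; simp, hadj⟩
      rw [hS2]
      obtain ⟨fb', rfl⟩ : ∃ fb', fb = fb' + 1 := ⟨fb - 1, by omega⟩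
      rw [pvBfsLoop]
      rw [if_pos rfl]
    · -- the heap pops its least entry e
      obtain ⟨e, hPop, heMem, hMin⟩ := pvPopMin_spec heap hHe
      rcases (hHeap e).1 heMem with ⟨he1, heP⟩ | ⟨he1, heN⟩
      · -- CASE A: e is a current-layer entry (distance d, pending cell)
        obtain ⟨e1, e2⟩ := e
        simp only at he1 heP
        replace he1 := he1.symm
        subst he1
        simp only [pvDijkLoop, hPop]
        by_cases hTe : e2 = (m - 1, n - 1)
        · rw [if_pos (by rw [hTe]; exact ⟨rfl, rfl⟩)]
          rw [pvBfsLoop]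
          rw [if_neg hFne, if_pos (hTe ▸ hPF heP)]
        · rw [if_neg (fun hcomp => hTe (Prod.ext_iff.2 ⟨hcomp.1, hcomp.2⟩))]
          rw [pvPushFold_eq g m n d e2.1 e2.2 pvOffsets (heap.erase (d, e2)) D (by decide)]
          dsimp only
          set FF := pvOffsets.filter (fun o => decide (pvCond g m n D e2.1 e2.2 o)) with hFFdef
          have hFFf : ∀ o ∈ FF, D.contains (pvTgt e2.1 e2.2 o) = false := by
            intro o ho
            have hc := (List.mem_filter.1 ho).2
            rw [decide_eq_true_eq] at hc
            exact hc.2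
          have hFFnd : FF.Nodup := List.Nodup.filter _ (by decide)
          obtain ⟨hDc, hDnd, hDlen⟩ := pvDictFacts e2.1 e2.2 d D hKnd FF hFFf hFFnd
          have hPushChar : ∀ w, (∃ o ∈ FF, w = pvTgt e2.1 e2.2 o) ↔
              (pvOk g m n w ∧ D.contains w = false ∧ w ∈ pvNbrs e2) := by
            intro w
            constructor
            · rintro ⟨o, ho, rfl⟩
              have hc := (List.mem_filter.1 ho).2
              rw [decide_eq_true_eq] at hc
              exact ⟨hc.1, hc.2, (pvNbrs_iff e2 _).2 ⟨o, (List.mem_filter.1 ho).1, rfl⟩⟩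
            · rintro ⟨hok, hcf, hnb⟩
              obtain ⟨o, ho, rfl⟩ := (pvNbrs_iff e2 w).1 hnb
              exact ⟨o, List.mem_filter.2 ⟨ho, decide_eq_true ⟨hok, hcf⟩⟩, rfl⟩
          have he2P' : e2 ∉ P.erase e2 := fun h => ((hPnd.mem_erase_iff).1 h).1 rfl
          have hN' : ∀ w, pvN g m n F (P.erase e2) V w ↔
              pvN g m n F P V w ∨ (pvOk g m n w ∧ w ∉ V ∧ w ∈ pvNbrs e2) := by
            intro w
            unfold pvN
            constructor
            · rintro ⟨hok, hnv, v, hvF, hvP', hadj⟩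
              by_cases hv2 : v = e2
              · subst hv2
                exact Or.inr ⟨hok, hnv, hadj⟩
              · exact Or.inl ⟨hok, hnv, v, hvF,
                  fun h => hvP' ((hPnd.mem_erase_iff).2 ⟨hv2, h⟩), hadj⟩
            · rintro (⟨hok, hnv, v, hvF, hvP, hadj⟩ | ⟨hok, hnv, hadj⟩)
              · exact ⟨hok, hnv, v, hvF, fun h => hvP (List.mem_of_mem_erase h), hadj⟩
              · exact ⟨hok, hnv, e2, hPF heP, he2P', hadj⟩
          have hHeap' : ∀ e', e' ∈ heap.erase (d, e2) ++
              FF.map (fun o => (d + 1, pvTgt e2.1 e2.2 o)) ↔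
              (e'.1 = d ∧ e'.2 ∈ P.erase e2) ∨
              (e'.1 = d + 1 ∧ pvN g m n F (P.erase e2) V e'.2) := by
            intro e'
            rw [List.mem_append]
            constructor
            · rintro (hr | hp)
              · obtain ⟨hne, hin⟩ := hNd.mem_erase_iff.1 hr
                rcases (hHeap e').1 hin with ⟨h1, h2⟩ | ⟨h1, h2⟩
                · refine Or.inl ⟨h1, (hPnd.mem_erase_iff).2 ⟨?_, h2⟩⟩
                  intro h
                  exact hne (Prod.ext_iff.2 ⟨h1, h⟩)
                · exact Or.inr ⟨h1, (hN' e'.2).2 (Or.inl h2)⟩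
              · obtain ⟨o, hoFF, heq⟩ := List.mem_map.1 hp
                have h1 : e'.1 = d + 1 := by rw [← heq]
                have h2 : e'.2 = pvTgt e2.1 e2.2 o := by rw [← heq]
                have hw := (hPushChar e'.2).1 ⟨o, hoFF, h2⟩
                refine Or.inr ⟨h1, (hN' e'.2).2 (Or.inr ⟨hw.1, ?_, hw.2.2⟩)⟩
                have hcf := (hDf e'.2).1 hw.2.1
                tauto
            · rintro (⟨h1, h2⟩ | ⟨h1, h2⟩)
              · obtain ⟨hne2, hinP⟩ := (hPnd.mem_erase_iff).1 h2
                refine Or.inl (hNd.mem_erase_iff.2 ⟨?_, (hHeap e').2 (Or.inl ⟨h1, hinP⟩)⟩)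
                intro h
                exact hne2 (by rw [h])
              · by_cases hNold : pvN g m n F P V e'.2
                · refine Or.inl (hNd.mem_erase_iff.2 ⟨?_, (hHeap e').2 (Or.inr ⟨h1, hNold⟩)⟩)
                  intro h
                  rw [h] at h1
                  dsimp only at h1
                  omega
                · rcases (hN' e'.2).1 h2 with h | ⟨hok, hnv, hadj⟩
                  · exact absurd h hNold
                  · refine Or.inr (List.mem_map.2 ?_)
                    have hcf : D.contains e'.2 = false := (hDf e'.2).2 (by tauto)
                    obtain ⟨o, ho, h2'⟩ := (hPushChar e'.2).2 ⟨hok, hcf, hadj⟩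
                    exact ⟨o, ho, Prod.ext_iff.2 ⟨h1.symm, h2'.symm⟩⟩
          have hD' : ∀ w, ((FF.foldl (fun Dd o => Dd.insert (pvTgt e2.1 e2.2 o) (d + 1)) D).contains w = true) ↔
              w ∈ V ∨ pvN g m n F (P.erase e2) V w := by
            intro w
            rw [hDc w]
            constructor
            · rintro (hc | hex)
              · rcases (hD w).1 hc with h | h
                · exact Or.inl h
                · exact Or.inr ((hN' w).2 (Or.inl h))
              · have hw := (hPushChar w).1 hex
                have hcf := (hDf w).1 hw.2.1
                exact Or.inr ((hN' w).2 (Or.inr ⟨hw.1, by tauto, hw.2.2⟩))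
            · rintro (hV | hNw)
              · exact Or.inl ((hD w).2 (Or.inl hV))
              · rcases (hN' w).1 hNw with h | ⟨hok, hnv, hadj⟩
                · exact Or.inl ((hD w).2 (Or.inr h))
                · cases hc : D.contains w
                  · exact Or.inr ((hPushChar w).2 ⟨hok, hc, hadj⟩)
                  · exact Or.inl rfl
          have hNd' : (heap.erase (d, e2) ++
              FF.map (fun o => (d + 1, pvTgt e2.1 e2.2 o))).Nodup := by
            refine (hNd.erase _).append ?_ ?_
            · exact hFFnd.map_on (fun o ho o' ho' h =>
                pvTgt_inj e2.1 e2.2 o o' (Prod.ext_iff.1 h).2)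
            · intro x hx1 hx2
              obtain ⟨o, ho, heq⟩ := List.mem_map.1 hx2
              have hcf : D.contains x.2 = false := by
                rw [← heq]
                exact hFFf o ho
              obtain ⟨hne, hin⟩ := hNd.mem_erase_iff.1 hx1
              rcases (hHeap x).1 hin with ⟨h1, h2⟩ | ⟨h1, h2⟩
              · rw [← heq] at h1
                dsimp only at h1
                omega
              · have hct := (hD x.2).2 (Or.inr h2)
                rw [hct] at hcf
                simp at hcf
          have hKle : (FF.foldl (fun Dd o => Dd.insert (pvTgt e2.1 e2.2 o) (d + 1)) D).keys.length ≤
              (m * n).toNat + 1 := by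
            refine pvCard m n _ hDnd ?_
            intro k hk
            have hc := (PySem.Dict.contains_iff_mem_keys _ k).2 hk
            rcases (hD' k).1 hc with hV | hN
            · exact hVin k hV
            · obtain ⟨hok, -⟩ := hN
              exact Or.inr ⟨hok.1, hok.2.1, hok.2.2.1, hok.2.2.2.1⟩
          have hKle' : D.keys.length + FF.length ≤ (m * n).toNat + 1 := by
            rw [hDlen] at hKle
            exact hKle
          have hlen1 : (heap.erase (d, e2)).length = heap.length - 1 :=
            List.length_erase_of_mem heMem
          have hheapPos : 0 < heap.length := List.length_pos_of_mem heMem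
          refine ih _ _ (fb + 1) F (P.erase e2) V d
            ⟨hNd', hHeap', hD', hDnd,
              fun x hx => hPF (List.mem_of_mem_erase hx), hFV, hPnd.erase _, hVnd, hFne,
              fun h => (hPnd.mem_erase_iff).2 ⟨fun hq => hTe hq.symm, hTgtF h⟩, hVin⟩
            ?_ hHb
          rw [List.length_append, List.length_map, hDlen, hlen1]
          omega
      · -- CASE B: e is a next-layer entry: the whole layer is processed, B advances one step
        obtain ⟨e1, e2⟩ := e
        simp only at he1 heN
        subst he1
        have hP : P = [] := by
          rcases hP : P with _ | ⟨p, P'⟩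
          · rfl
          · have hmemp := (hHeap (d, p)).2 (Or.inl ⟨rfl, by rw [hP]; exact List.mem_cons_self⟩)
            have hq := hMin (d, p) hmemp
            rw [pvEntLt_first (d, p) (d + 1, e2) (by dsimp only; omega)] at hq
            simp at hq
        subst hP
        simp only [pvDijkLoop, hPop]
        rw [pvBfsLoop]
        rw [if_neg hFne]
        rw [if_neg (show ¬ (m - 1, n - 1) ∈ F from fun h => by
          have := hTgtF h; simp at this)]
        obtain ⟨hm2, hm1, hnd1, hnd2, hlenB⟩ :=
          pvScanFold_spec g m n V F V PySem.Set.empty (by intro x; simp [PySem.Set.empty])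
            hVnd (by simp [PySem.Set.empty])
        have hNxtChar : ∀ x, x ∈ (F.foldl (pvScan g m n) (V, PySem.Set.empty)).2 ↔
            pvN g m n F [] V x := by
          intro x
          rw [hm2 x]
          unfold pvN
          constructor
          · rintro (hx0 | ⟨hok, hnv, p, hp, hadj⟩)
            · simp [PySem.Set.empty] at hx0
            · exact ⟨hok, hnv, p, hp, by simp, hadj⟩
          · rintro ⟨hok, hnv, p, hp, -, hadj⟩
            exact Or.inr ⟨hok, hnv, p, hp, hadj⟩
        have hwmN : e2 ∈ (F.foldl (pvScan g m n) (V, PySem.Set.empty)).2 := (hNxtChar e2).2 heN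
        by_cases hTe : e2 = (m - 1, n - 1)
        · rw [if_pos (by rw [hTe]; exact ⟨rfl, rfl⟩)]
          obtain ⟨fb', rfl⟩ : ∃ fb', fb = fb' + 1 := ⟨fb - 1, by omega⟩
          rw [pvBfsLoop]
          rw [if_neg (List.ne_nil_of_mem hwmN)]
          rw [if_pos (by rw [← hTe]; exact hwmN)]
        · rw [if_neg (fun hcomp => hTe (Prod.ext_iff.2 ⟨hcomp.1, hcomp.2⟩))]
          rw [pvPushFold_eq g m n (d + 1) e2.1 e2.2 pvOffsets (heap.erase (d + 1, e2)) D
            (by decide)]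
          dsimp only
          set NX := (F.foldl (pvScan g m n) (V, PySem.Set.empty)).2 with hNXdef
          set VX := (F.foldl (pvScan g m n) (V, PySem.Set.empty)).1 with hVXdef
          set FF := pvOffsets.filter (fun o => decide (pvCond g m n D e2.1 e2.2 o)) with hFFdef
          have hFFf : ∀ o ∈ FF, D.contains (pvTgt e2.1 e2.2 o) = false := by
            intro o ho
            have hc := (List.mem_filter.1 ho).2
            rw [decide_eq_true_eq] at hc
            exact hc.2
          have hFFnd : FF.Nodup := List.Nodup.filter _ (by decide)
          obtain ⟨hDc, hDnd, hDlen⟩ := pvDictFacts e2.1 e2.2 (d + 1) D hKnd FF hFFf hFFnd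
          have hPushChar : ∀ w, (∃ o ∈ FF, w = pvTgt e2.1 e2.2 o) ↔
              (pvOk g m n w ∧ D.contains w = false ∧ w ∈ pvNbrs e2) := by
            intro w
            constructor
            · rintro ⟨o, ho, rfl⟩
              have hc := (List.mem_filter.1 ho).2
              rw [decide_eq_true_eq] at hc
              exact ⟨hc.1, hc.2, (pvNbrs_iff e2 _).2 ⟨o, (List.mem_filter.1 ho).1, rfl⟩⟩
            · rintro ⟨hok, hcf, hnb⟩
              obtain ⟨o, ho, rfl⟩ := (pvNbrs_iff e2 w).1 hnb
              exact ⟨o, List.mem_filter.2 ⟨ho, decide_eq_true ⟨hok, hcf⟩⟩, rfl⟩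
          have hcfX : ∀ w, D.contains w = false ↔ w ∉ VX := by
            intro w
            rw [hDf w]
            constructor
            · intro h hw
              rcases (hm1 w).1 hw with hV | hN
              · exact h (Or.inl hV)
              · exact h (Or.inr ((hNxtChar w).1 hN))
            · intro h
              rintro (hV | hN)
              · exact h ((hm1 w).2 (Or.inl hV))
              · exact h ((hm1 w).2 (Or.inr ((hNxtChar w).2 hN)))
          have he2P' : e2 ∉ NX.erase e2 := fun h => ((hnd2.mem_erase_iff).1 h).1 rfl
          have hNhat : ∀ w, pvN g m n NX (NX.erase e2) VX w ↔
              (pvOk g m n w ∧ w ∉ VX ∧ w ∈ pvNbrs e2) := by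
            intro w
            unfold pvN
            constructor
            · rintro ⟨hok, hnv, v, hvF, hvP, hadj⟩
              have hv2 : v = e2 := by
                by_contra hne
                exact hvP ((hnd2.mem_erase_iff).2 ⟨hne, hvF⟩)
              subst hv2
              exact ⟨hok, hnv, hadj⟩
            · rintro ⟨hok, hnv, hadj⟩
              exact ⟨hok, hnv, e2, hwmN, he2P', hadj⟩
          have hHeap' : ∀ e', e' ∈ heap.erase (d + 1, e2) ++
              FF.map (fun o => (d + 1 + 1, pvTgt e2.1 e2.2 o)) ↔
              (e'.1 = d + 1 ∧ e'.2 ∈ NX.erase e2) ∨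
              (e'.1 = d + 1 + 1 ∧ pvN g m n NX (NX.erase e2) VX e'.2) := by
            intro e'
            rw [List.mem_append]
            constructor
            · rintro (hr | hp)
              · obtain ⟨hne, hin⟩ := hNd.mem_erase_iff.1 hr
                rcases (hHeap e').1 hin with ⟨h1, h2⟩ | ⟨h1, h2⟩
                · simp at h2
                · refine Or.inl ⟨h1, (hnd2.mem_erase_iff).2 ⟨?_, (hNxtChar e'.2).2 h2⟩⟩
                  intro h
                  exact hne (Prod.ext_iff.2 ⟨h1, h⟩)
              · obtain ⟨o, hoFF, heq⟩ := List.mem_map.1 hp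
                have h1 : e'.1 = d + 1 + 1 := by rw [← heq]
                have h2 : e'.2 = pvTgt e2.1 e2.2 o := by rw [← heq]
                have hw := (hPushChar e'.2).1 ⟨o, hoFF, h2⟩
                exact Or.inr ⟨h1, (hNhat e'.2).2 ⟨hw.1, (hcfX e'.2).1 hw.2.1, hw.2.2⟩⟩
            · rintro (⟨h1, h2⟩ | ⟨h1, h2⟩)
              · obtain ⟨hne2, hinN⟩ := (hnd2.mem_erase_iff).1 h2
                refine Or.inl (hNd.mem_erase_iff.2
                  ⟨?_, (hHeap e').2 (Or.inr ⟨h1, (hNxtChar e'.2).1 hinN⟩)⟩)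
                intro h
                exact hne2 (by rw [h])
              · obtain ⟨hok, hnv, hadj⟩ := (hNhat e'.2).1 h2
                refine Or.inr (List.mem_map.2 ?_)
                obtain ⟨o, ho, h2'⟩ := (hPushChar e'.2).2 ⟨hok, (hcfX e'.2).2 hnv, hadj⟩
                exact ⟨o, ho, Prod.ext_iff.2 ⟨h1.symm, h2'.symm⟩⟩
          have hD' : ∀ w, ((FF.foldl (fun Dd o => Dd.insert (pvTgt e2.1 e2.2 o) (d + 1 + 1)) D).contains w = true) ↔
              w ∈ VX ∨ pvN g m n NX (NX.erase e2) VX w := by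
            intro w
            rw [hDc w]
            constructor
            · rintro (hc | hex)
              · refine Or.inl ?_
                by_contra hv
                have := (hcfX w).2 hv
                rw [hc] at this
                simp at this
              · have hw := (hPushChar w).1 hex
                exact Or.inr ((hNhat w).2 ⟨hw.1, (hcfX w).1 hw.2.1, hw.2.2⟩)
            · rintro (hV | hNw)
              · cases hc : D.contains w
                · exact absurd ((hcfX w).1 hc) (not_not.2 hV)
                · exact Or.inl rfl
              · obtain ⟨hok, hnv, hadj⟩ := (hNhat w).1 hNw
                exact Or.inr ((hPushChar w).2 ⟨hok, (hcfX w).2 hnv, hadj⟩)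
          have hNd' : (heap.erase (d + 1, e2) ++
              FF.map (fun o => (d + 1 + 1, pvTgt e2.1 e2.2 o))).Nodup := by
            refine (hNd.erase _).append ?_ ?_
            · exact hFFnd.map_on (fun o ho o' ho' h =>
                pvTgt_inj e2.1 e2.2 o o' (Prod.ext_iff.1 h).2)
            · intro x hx1 hx2
              obtain ⟨o, ho, heq⟩ := List.mem_map.1 hx2
              have hcf : D.contains x.2 = false := by
                rw [← heq]
                exact hFFf o ho
              obtain ⟨hne, hin⟩ := hNd.mem_erase_iff.1 hx1
              rcases (hHeap x).1 hin with ⟨h1, h2⟩ | ⟨h1, h2⟩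
              · simp at h2
              · have hct := (hD x.2).2 (Or.inr h2)
                rw [hct] at hcf
                simp at hcf
          have hKle : ((FF.foldl (fun Dd o => Dd.insert (pvTgt e2.1 e2.2 o) (d + 1 + 1)) D)).keys.length ≤
              (m * n).toNat + 1 := by
            refine pvCard m n _ hDnd ?_
            intro k hk
            have hc := (PySem.Dict.contains_iff_mem_keys _ k).2 hk
            rcases (hD' k).1 hc with hV | hN
            · rcases (hm1 k).1 hV with h | h
              · exact hVin k h
              · have := ((hNxtChar k).1 h).1
                exact Or.inr ⟨this.1, this.2.1, this.2.2.1, this.2.2.2.1⟩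
            · obtain ⟨hok, -⟩ := hN
              exact Or.inr ⟨hok.1, hok.2.1, hok.2.2.1, hok.2.2.2.1⟩
          have hVinX : ∀ x ∈ VX, x = (0, 0) ∨ (0 ≤ x.1 ∧ x.1 < m ∧ 0 ≤ x.2 ∧ x.2 < n) := by
            intro x hx
            rcases (hm1 x).1 hx with h | h
            · exact hVin x h
            · have := ((hNxtChar x).1 h).1
              exact Or.inr ⟨this.1, this.2.1, this.2.2.1, this.2.2.2.1⟩
          have hKle' : D.keys.length + FF.length ≤ (m * n).toNat + 1 := by
            rw [hDlen] at hKle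
            exact hKle
          have hlen1 : (heap.erase (d + 1, e2)).length = heap.length - 1 :=
            List.length_erase_of_mem heMem
          have hheapPos : 0 < heap.length := List.length_pos_of_mem heMem
          have hVXlen : VX.length = V.length + NX.length := by
            have := hlenB
            simp only [PySem.Set.empty, List.length_nil] at this
            omega
          have hNXpos : 0 < NX.length := List.length_pos_of_mem hwmN
          have hVXle : VX.length ≤ (m * n).toNat + 1 := pvCard m n VX hnd1 hVinX
          refine ih _ _ fb NX (NX.erase e2) VX (d + 1)
            ⟨hNd', hHeap', hD', hDnd, List.erase_subset,
              fun x hx => (hm1 x).2 (Or.inr hx), hnd2.erase _, hnd1,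
              List.ne_nil_of_mem hwmN,
              fun h => (hnd2.mem_erase_iff).2 ⟨fun hq => hTe hq.symm, h⟩, hVinX⟩
            ?_ ?_
          · rw [List.length_append, List.length_map, hDlen, hlen1]
            omega
          · omega


lemma pvDijkstra_eq_pvShortest (g : List (List Int)) (m n : Int) :
    pvDijkstra g m n = pvShortest g m n := by
  unfold pvDijkstra pvShortest
  have hkl : (PySem.Dict.empty.insert ((0 : Int), (0 : Int)) (0 : Int)).keys.length = 1 := rfl
  have h := pvMain g m n ((m * n).toNat + 2) [(0, 0, 0)]
      (PySem.Dict.empty.insert (0, 0) 0) ((m * n).toNat + 2)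
      [(0, 0)] [(0, 0)] [(0, 0)] 0
      ?_ (by rw [hkl]; simp only [List.length_cons, List.length_nil]; omega)
      (by simp only [List.length_cons, List.length_nil]; omega)
  · rw [h]
  refine ⟨List.nodup_singleton _, ?_, ?_,
    PySem.Dict.nodup_keys_insert _ _ _ PySem.Dict.nodup_keys_empty,
    fun x h => h, fun x h => h, List.nodup_singleton _, List.nodup_singleton _,
    by simp, fun h => h, ?_⟩
  · intro e
    constructor
    · intro he
      rw [List.mem_singleton] at he
      subst he
      exact Or.inl ⟨rfl, List.mem_singleton.2 rfl⟩
    · rintro (⟨h1, h2⟩ | ⟨h1, h2⟩)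
      · rw [List.mem_singleton] at h2
        rw [List.mem_singleton]
        exact Prod.ext_iff.2 ⟨h1, h2⟩
      · obtain ⟨-, -, v, hvF, hvP, -⟩ := h2
        rw [List.mem_singleton] at hvF
        exact absurd (List.mem_singleton.2 hvF) hvP
  · intro w
    simp only [PySem.Dict.contains_insert, PySem.Dict.contains_empty, Bool.or_false,
      beq_iff_eq]
    constructor
    · intro h
      exact Or.inl (List.mem_singleton.2 h)
    · rintro (h | h)
      · exact List.mem_singleton.1 h
      · obtain ⟨-, -, v, hvF, hvP, -⟩ := h
        rw [List.mem_singleton] at hvF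
        exact absurd (List.mem_singleton.2 hvF) hvP
  · intro x hx
    rw [List.mem_singleton] at hx
    exact Or.inl hx

-- ---- outer loops ----

lemma pvFoldRel {α β γ : Type} (R : α → β → Prop) (f : α → γ → α) (h : β → γ → β)
    (hstep : ∀ a b c, R a b → R (f a c) (h b c)) :
    ∀ (l : List γ) (a : α) (b : β), R a b → R (l.foldl f a) (l.foldl h b) := by
  intro l
  induction l with
  | nil => intro a b hr; exact hr
  | cons x xs ih => intro a b hr; exact ih _ _ (hstep a b x hr)

lemma pvOuterEq (g : List (List Int)) (m n : Int) :
    (match (PySem.List.pyRange 0 m 1).foldl (fun acc i =>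
        (PySem.List.pyRange 0 n 1).foldl (fun acc j =>
          if pvCell g i j = 0 then pvMaxO acc (pvDijkstra (pvSetCell g i j 1) m n)
          else acc) acc) (some 0) with
      | some v => v
      | none => -1) =
    (if ((PySem.List.pyRange 0 m 1).foldl (fun acc i =>
        (PySem.List.pyRange 0 n 1).foldl (fun acc j =>
          if pvCell g i j = 0 then
            match pvShortest (pvSetCell g i j 1) m n with
            | none => (true, acc.2)
            | some d => (acc.1, max acc.2 d)
          else acc) acc) (false, (0 : Int))).1 then -1
     else ((PySem.List.pyRange 0 m 1).foldl (fun acc i =>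
        (PySem.List.pyRange 0 n 1).foldl (fun acc j =>
          if pvCell g i j = 0 then
            match pvShortest (pvSetCell g i j 1) m n with
            | none => (true, acc.2)
            | some d => (acc.1, max acc.2 d)
          else acc) acc) (false, (0 : Int))).2) := by
  have hstep : ∀ (a : Option Int) (b : Bool × Int) (i : Int),
      a = (if b.1 then none else some b.2) →
      ((PySem.List.pyRange 0 n 1).foldl (fun acc j =>
          if pvCell g i j = 0 then pvMaxO acc (pvDijkstra (pvSetCell g i j 1) m n)
          else acc) a) =
        (if ((PySem.List.pyRange 0 n 1).foldl (fun acc j =>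
          if pvCell g i j = 0 then
            match pvShortest (pvSetCell g i j 1) m n with
            | none => (true, acc.2)
            | some d => (acc.1, max acc.2 d)
          else acc) b).1 then none
         else some ((PySem.List.pyRange 0 n 1).foldl (fun acc j =>
          if pvCell g i j = 0 then
            match pvShortest (pvSetCell g i j 1) m n with
            | none => (true, acc.2)
            | some d => (acc.1, max acc.2 d)
          else acc) b).2) := by
    intro a b i hab
    refine pvFoldRel (fun a b => a = (if b.1 then none else some b.2)) _ _
      ?_ (PySem.List.pyRange 0 n 1) a b hab
    intro a' b' j hr
    by_cases hc : pvCell g i j = 0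
    · rw [if_pos hc, if_pos hc]
      rw [pvDijkstra_eq_pvShortest (pvSetCell g i j 1) m n]
      subst hr
      cases hres : pvShortest (pvSetCell g i j 1) m n
      · cases hb : b'.1 <;> simp [pvMaxO]
      · cases hb : b'.1 <;> simp [pvMaxO]
    · rw [if_neg hc, if_neg hc]
      exact hr
  have hfold := pvFoldRel (fun a b => a = (if b.1 then none else some b.2))
    _ _ (fun a b i hr => hstep a b i hr) (PySem.List.pyRange 0 m 1)
    (some 0) (false, (0 : Int)) (by simp)
  dsimp only at hfold
  cases hb : ((PySem.List.pyRange 0 m 1).foldl (fun acc i =>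
        (PySem.List.pyRange 0 n 1).foldl (fun acc j =>
          if pvCell g i j = 0 then
            match pvShortest (pvSetCell g i j 1) m n with
            | none => (true, acc.2)
            | some d => (acc.1, max acc.2 d)
          else acc) acc) (false, (0 : Int))).1
  · rw [hb] at hfold
    rw [if_neg (by simp)] at hfold
    rw [hfold]
    simp
  · rw [hb] at hfold
    rw [if_pos rfl] at hfold
    rw [hfold]
    simp

-- ===== VERDICT (by name: the statement is the Claim_ definition above) =====
theorem max_time_to_escape_spec : Claim_equal_max_time_to_escape := by
  unfold Claim_equal_max_time_to_escape
  intro fortress _ _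
  unfold Spec_max_time_to_escape max_time_to_escape max_time_to_escape_alt
  exact pvOuterEq fortress (PySem.List.len fortress)
    (PySem.List.len (PySem.List.pyGetD fortress 0 []))
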